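-- pv_equiv track=rewrite | github.com/kchapinriddle/Advent-of-Code-2021 | Day22/day22.py | split_below
-- ===== SOURCE A (Python) =====
-- def split_below(old_c, x, y, z):
--     to_split = []
--     did_split = [old_c.copy()]
--     # Split on X axis
--     if old_c[1] < x and x <= old_c[2]:
--         to_split = did_split
--         did_split = []
--         for c in to_split:
--             nc_low, nc_high = c.copy(), c.copy()
--             nc_low[2], nc_high[1] = x-1, x
--             did_split += [nc_low,nc_high]
--     if old_c[3] < y and y <= old_c[4]:
--         to_split = did_split
--         did_split = []
--         for c in to_split:
--             nc_low, nc_high = c.copy(), c.copy()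
--             nc_low[4], nc_high[3] = y-1, y
--             did_split += [nc_low,nc_high]
--     if old_c[5] < z and z <= old_c[6]:
--         to_split = did_split
--         did_split = []
--         for c in to_split:
--             nc_low, nc_high = c.copy(), c.copy()
--             nc_low[6], nc_high[5] = z-1, z
--             did_split += [nc_low,nc_high]
--     return did_split
-- ===== SOURCE B (Python) =====
-- def split_below(old_c, x, y, z):
--     # Precompute per-axis interval lists, then emit the Cartesian product
--     # (x outer, y middle, z inner; low before high) in one pass.
--     def axis(lo, hi, cut):
--         if lo < cut <= hi:
--             return [(lo, cut - 1), (cut, hi)]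
--         return [(lo, hi)]
--     xs = axis(old_c[1], old_c[2], x)
--     ys = axis(old_c[3], old_c[4], y)
--     zs = axis(old_c[5], old_c[6], z)
--     out = []
--     for xi in xs:
--         for yi in ys:
--             for zi in zs:
--                 p = old_c.copy()
--                 p[1], p[2] = xi
--                 p[3], p[4] = yi
--                 p[5], p[6] = zi
--                 out.append(p)
--     return out
-- ===== Notes on version B (the rewrite author's own statement) =====
-- stated objective: simpler
-- what changed: Replaces A's three successive list-doubling split passes (rebuilding the whole piece list per axis) by precomputed per-axis interval lists and a single Cartesian-product pass that writes all six bounds into a copy of old_c.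
-- outside the precondition, e.g. on split_below([0, 1, 2, 3, 4, 0], 0, 0, 0): A returns [[0, 1, 2, 3, 4, 0]], B raises IndexError
import Mathlib
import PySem

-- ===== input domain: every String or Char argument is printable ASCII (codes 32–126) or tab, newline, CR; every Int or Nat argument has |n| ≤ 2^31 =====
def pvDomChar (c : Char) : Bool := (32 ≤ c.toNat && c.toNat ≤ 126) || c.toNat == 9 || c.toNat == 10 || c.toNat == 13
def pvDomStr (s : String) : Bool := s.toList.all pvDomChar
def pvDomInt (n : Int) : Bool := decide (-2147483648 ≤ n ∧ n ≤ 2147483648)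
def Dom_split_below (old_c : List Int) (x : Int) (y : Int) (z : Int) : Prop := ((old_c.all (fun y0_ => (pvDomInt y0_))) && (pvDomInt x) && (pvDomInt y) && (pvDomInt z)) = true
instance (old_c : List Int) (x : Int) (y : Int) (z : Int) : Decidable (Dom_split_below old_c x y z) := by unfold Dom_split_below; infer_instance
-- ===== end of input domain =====

-- B replaces A's three list-doubling passes by per-axis interval lists and one
-- Cartesian-product pass (objective: simpler; same output, same order).

-- ===== PORT A =====
def split_below (old_c : List Int) (x : Int) (y : Int) (z : Int) : List (List Int) :=
  let did0 : List (List Int) := [old_c]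
  let did1 : List (List Int) :=
    if PySem.List.pyGetD old_c 1 0 < x ∧ x ≤ PySem.List.pyGetD old_c 2 0 then
      did0.foldl (fun acc c => acc ++ [PySem.List.pySetD c 2 (x-1), PySem.List.pySetD c 1 x]) []
    else did0
  let did2 : List (List Int) :=
    if PySem.List.pyGetD old_c 3 0 < y ∧ y ≤ PySem.List.pyGetD old_c 4 0 then
      did1.foldl (fun acc c => acc ++ [PySem.List.pySetD c 4 (y-1), PySem.List.pySetD c 3 y]) []
    else did1
  if PySem.List.pyGetD old_c 5 0 < z ∧ z ≤ PySem.List.pyGetD old_c 6 0 then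
    did2.foldl (fun acc c => acc ++ [PySem.List.pySetD c 6 (z-1), PySem.List.pySetD c 5 z]) []
  else did2

-- ===== PORT B =====
def axisIntervals (lo hi cut : Int) : List (Int × Int) :=
  if lo < cut ∧ cut ≤ hi then [(lo, cut - 1), (cut, hi)] else [(lo, hi)]

def split_below_alt (old_c : List Int) (x : Int) (y : Int) (z : Int) : List (List Int) :=
  let xs := axisIntervals (PySem.List.pyGetD old_c 1 0) (PySem.List.pyGetD old_c 2 0) x
  let ys := axisIntervals (PySem.List.pyGetD old_c 3 0) (PySem.List.pyGetD old_c 4 0) y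
  let zs := axisIntervals (PySem.List.pyGetD old_c 5 0) (PySem.List.pyGetD old_c 6 0) z
  xs.flatMap fun xi => ys.flatMap fun yi => zs.map fun zi =>
    PySem.List.pySetD (PySem.List.pySetD (PySem.List.pySetD (PySem.List.pySetD
      (PySem.List.pySetD (PySem.List.pySetD old_c 1 xi.1) 2 xi.2) 3 yi.1) 4 yi.2) 5 zi.1) 6 zi.2

-- ===== PRECONDITION & SPEC =====
-- Pre_ excludes lists with fewer than 7 elements: there A either raises IndexError or
-- returns only because its short-circuit `and` happens to skip an out-of-range read,
-- while B reads all six bounds up front and raises IndexError.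
def Pre_split_below (old_c : List Int) (x : Int) (y : Int) (z : Int) : Prop := 7 ≤ old_c.length
instance (old_c : List Int) (x : Int) (y : Int) (z : Int) : Decidable (Pre_split_below old_c x y z) := by unfold Pre_split_below; infer_instance
def pvWitness_split_below : List Int × Int × Int × Int := ([0, 0, 10, 0, 10, 0, 10], 5, 11, 3)

def Spec_split_below (old_c : List Int) (x : Int) (y : Int) (z : Int) (out : List (List Int)) : Prop := out = split_below_alt old_c x y z
instance (old_c : List Int) (x : Int) (y : Int) (z : Int) (out : List (List Int)) : Decidable (Spec_split_below old_c x y z out) := by unfold Spec_split_below; infer_instance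

-- ===== CLAIM (what is proved, stated in full; the proofs are below) =====
def Claim_equal_split_below : Prop := ∀ (old_c : List Int) (x : Int) (y : Int) (z : Int), Dom_split_below old_c x y z → Pre_split_below old_c x y z → Spec_split_below old_c x y z (split_below old_c x y z)

-- ===== LEMMAS AND PROOFS =====
theorem pvGetD1 (a0 a1 a2 a3 a4 a5 a6 : Int) (t : List Int) :
    PySem.List.pyGetD (a0::a1::a2::a3::a4::a5::a6::t) 1 0 = a1 := by
  simp [PySem.List.pyGetD, PySem.List.pyGet?, PySem.List.pyIdx?]
  rw [if_pos (by omega)]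
  simp

theorem pvSetD1 (a0 a1 a2 a3 a4 a5 a6 v : Int) (t : List Int) :
    PySem.List.pySetD (a0::a1::a2::a3::a4::a5::a6::t) 1 v = a0::v::a2::a3::a4::a5::a6::t := by
  simp [PySem.List.pySetD, PySem.List.pySet?, PySem.List.pyIdx?]
  rw [if_pos (by omega)]
  simp

theorem pvGetD2 (a0 a1 a2 a3 a4 a5 a6 : Int) (t : List Int) :
    PySem.List.pyGetD (a0::a1::a2::a3::a4::a5::a6::t) 2 0 = a2 := by
  simp [PySem.List.pyGetD, PySem.List.pyGet?, PySem.List.pyIdx?]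
  rw [if_pos (by omega)]
  simp

theorem pvSetD2 (a0 a1 a2 a3 a4 a5 a6 v : Int) (t : List Int) :
    PySem.List.pySetD (a0::a1::a2::a3::a4::a5::a6::t) 2 v = a0::a1::v::a3::a4::a5::a6::t := by
  simp [PySem.List.pySetD, PySem.List.pySet?, PySem.List.pyIdx?]
  rw [if_pos (by omega)]
  simp

theorem pvGetD3 (a0 a1 a2 a3 a4 a5 a6 : Int) (t : List Int) :
    PySem.List.pyGetD (a0::a1::a2::a3::a4::a5::a6::t) 3 0 = a3 := by
  simp [PySem.List.pyGetD, PySem.List.pyGet?, PySem.List.pyIdx?]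
  rw [if_pos (by omega)]
  simp

theorem pvSetD3 (a0 a1 a2 a3 a4 a5 a6 v : Int) (t : List Int) :
    PySem.List.pySetD (a0::a1::a2::a3::a4::a5::a6::t) 3 v = a0::a1::a2::v::a4::a5::a6::t := by
  simp [PySem.List.pySetD, PySem.List.pySet?, PySem.List.pyIdx?]
  rw [if_pos (by omega)]
  simp

theorem pvGetD4 (a0 a1 a2 a3 a4 a5 a6 : Int) (t : List Int) :
    PySem.List.pyGetD (a0::a1::a2::a3::a4::a5::a6::t) 4 0 = a4 := by
  simp [PySem.List.pyGetD, PySem.List.pyGet?, PySem.List.pyIdx?]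
  rw [if_pos (by omega)]
  simp

theorem pvSetD4 (a0 a1 a2 a3 a4 a5 a6 v : Int) (t : List Int) :
    PySem.List.pySetD (a0::a1::a2::a3::a4::a5::a6::t) 4 v = a0::a1::a2::a3::v::a5::a6::t := by
  simp [PySem.List.pySetD, PySem.List.pySet?, PySem.List.pyIdx?]
  rw [if_pos (by omega)]
  simp

theorem pvGetD5 (a0 a1 a2 a3 a4 a5 a6 : Int) (t : List Int) :
    PySem.List.pyGetD (a0::a1::a2::a3::a4::a5::a6::t) 5 0 = a5 := by
  simp [PySem.List.pyGetD, PySem.List.pyGet?, PySem.List.pyIdx?]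
  rw [if_pos (by omega)]
  simp

theorem pvSetD5 (a0 a1 a2 a3 a4 a5 a6 v : Int) (t : List Int) :
    PySem.List.pySetD (a0::a1::a2::a3::a4::a5::a6::t) 5 v = a0::a1::a2::a3::a4::v::a6::t := by
  simp [PySem.List.pySetD, PySem.List.pySet?, PySem.List.pyIdx?]
  rw [if_pos (by omega)]
  simp

theorem pvGetD6 (a0 a1 a2 a3 a4 a5 a6 : Int) (t : List Int) :
    PySem.List.pyGetD (a0::a1::a2::a3::a4::a5::a6::t) 6 0 = a6 := by
  simp [PySem.List.pyGetD, PySem.List.pyGet?, PySem.List.pyIdx?]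
  rw [if_pos (by omega)]
  simp

theorem pvSetD6 (a0 a1 a2 a3 a4 a5 a6 v : Int) (t : List Int) :
    PySem.List.pySetD (a0::a1::a2::a3::a4::a5::a6::t) 6 v = a0::a1::a2::a3::a4::a5::v::t := by
  simp [PySem.List.pySetD, PySem.List.pySet?, PySem.List.pyIdx?]
  rw [if_pos (by omega)]
  simp

theorem split_below_eq_alt (old_c : List Int) (x y z : Int)
    (h : 7 ≤ old_c.length) : split_below old_c x y z = split_below_alt old_c x y z := by
  rcases old_c with _ | ⟨a0, _ | ⟨a1, _ | ⟨a2, _ | ⟨a3, _ | ⟨a4, _ | ⟨a5, _ | ⟨a6, t⟩⟩⟩⟩⟩⟩⟩ <;>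
    simp only [List.length] at h <;> try omega
  simp only [split_below, split_below_alt, axisIntervals,
    pvGetD1, pvGetD2, pvGetD3, pvGetD4, pvGetD5, pvGetD6]
  split_ifs <;>
    simp [List.foldl, List.flatMap,
      pvSetD1, pvSetD2, pvSetD3, pvSetD4, pvSetD5, pvSetD6]

-- ===== VERDICT (by name: the statement is the Claim_ definition above) =====
theorem split_below_spec : Claim_equal_split_below := by
  intro old_c x y z _ hpre
  exact split_below_eq_alt old_c x y z hpre
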